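-- pv_equiv track=rewrite | github.com/kurusugawa-computer/annofab-cli | annofabcli/experimental/mask_user_info.py | create_masked_name
-- ===== SOURCE A (Python) =====
-- ALPHABET_SIZE = 26
--
-- DIGIT = 2
--
-- def create_masked_name(name: str) -> str:
--     """
--     マスクされた名前を返す。
--     AA,ABのように、26*26 パターンを返す
--     """
--
--     def _hash_str(value: str) -> int:
--         hash_value = 7
--         for c in value:
--             # 64bit integer
--             hash_value = (31 * hash_value + ord(c)) & 18446744073709551615
--         return hash_value
--
--     def _num2alpha(num):
--         """
--         1以上の整数を大文字アルファベットに変換する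
--         """
--         if num <= ALPHABET_SIZE:
--             return chr(64 + num)
--         elif num % 26 == 0:
--             return _num2alpha(num // ALPHABET_SIZE - 1) + chr(90)
--         else:
--             return _num2alpha(num // ALPHABET_SIZE) + chr(64 + num % ALPHABET_SIZE)
--
--     SIZE = pow(ALPHABET_SIZE, DIGIT)
--     hash_value = (_hash_str(name) % SIZE) + 1
--     return _num2alpha(hash_value)
-- ===== SOURCE B (Python) =====
-- def create_masked_name(name: str) -> str:
--     hash_value = 7
--     for c in name:
--         hash_value = (31 * hash_value + ord(c)) & 18446744073709551615
--     n = (hash_value % 676) + 1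
--     result = ""
--     while n > 0:
--         n, rem = divmod(n - 1, 26)
--         result = chr(65 + rem) + result
--     return result
-- ===== Notes on version B (the rewrite author's own statement) =====
-- stated objective: idiomatic
-- what changed: Replaces the three-branch recursive _num2alpha (with its mod-26==0 borrow case) by a single iterative bijective base-26 loop using divmod(n-1, 26); the hash loop is unchanged.
import Mathlib
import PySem

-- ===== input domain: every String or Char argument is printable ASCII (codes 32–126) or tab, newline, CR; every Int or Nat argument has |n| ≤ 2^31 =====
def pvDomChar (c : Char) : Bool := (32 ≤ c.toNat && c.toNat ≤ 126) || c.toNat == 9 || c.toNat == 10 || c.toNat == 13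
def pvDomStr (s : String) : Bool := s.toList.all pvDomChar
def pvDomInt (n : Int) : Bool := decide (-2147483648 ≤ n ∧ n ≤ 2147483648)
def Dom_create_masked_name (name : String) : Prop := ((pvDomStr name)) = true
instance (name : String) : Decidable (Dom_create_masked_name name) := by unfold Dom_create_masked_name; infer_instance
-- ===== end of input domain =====

-- B replaces the recursive bijective-base-26 _num2alpha with an iterative divmod(n-1, 26) loop (idiomatic); the hash loop is kept unchanged.

-- ===== PORT A =====
-- _hash_str: the 64-bit masked polynomial hash (shared verbatim by both Pythons)
def pvHashStr (value : List Char) : Int :=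
  value.foldl (fun h c => PySem.Int.band (31 * h + (c.toNat : Int)) 18446744073709551615) 7

-- _num2alpha, fuel-guarded structural recursion (fuel only makes the same recursion total)
def pvNum2alpha : Nat → Int → String
  | 0, _ => ""
  | f + 1, num =>
    if num ≤ 26 then String.ofList [Char.ofNat (64 + num).toNat]
    else if PySem.Int.mod num 26 = 0 then
      pvNum2alpha f (PySem.Int.floordiv num 26 - 1) ++ String.ofList [Char.ofNat 90]
    else
      pvNum2alpha f (PySem.Int.floordiv num 26) ++ String.ofList [Char.ofNat (64 + PySem.Int.mod num 26).toNat]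

def create_masked_name (name : String) : String :=
  let hash_value := PySem.Int.mod (pvHashStr name.toList) 676 + 1
  pvNum2alpha hash_value.toNat hash_value

-- ===== PORT B =====
-- the while-loop of Source B: while n > 0: n, rem = divmod(n - 1, 26); result = chr(65 + rem) + result
def pvAlphaLoop : Nat → Int → String → String
  | 0, _, result => result
  | f + 1, n, result =>
    if 0 < n then
      pvAlphaLoop f (PySem.Int.floordiv (n - 1) 26)
        (String.ofList [Char.ofNat (65 + PySem.Int.mod (n - 1) 26).toNat] ++ result)
    else result

def create_masked_name_alt (name : String) : String :=
  let n := PySem.Int.mod (pvHashStr name.toList) 676 + 1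
  pvAlphaLoop n.toNat n ""

-- ===== PRECONDITION & SPEC =====
def Spec_create_masked_name (name : String) (out : String) : Prop := out = create_masked_name_alt name
instance (name : String) (out : String) : Decidable (Spec_create_masked_name name out) := by unfold Spec_create_masked_name; infer_instance

-- ===== CLAIM (what is proved, stated in full; the proofs are below) =====
def Claim_equal_create_masked_name : Prop := ∀ (name : String), Dom_create_masked_name name → Spec_create_masked_name name (create_masked_name name)

-- ===== LEMMAS AND PROOFS =====
-- The hash lands in [1, 676]; on that finite range the two alphabet encoders agree (checked exhaustively).
lemma pvKey : ((List.range 676).all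
    (fun k => pvNum2alpha (k + 1) ((k : Int) + 1) == pvAlphaLoop (k + 1) ((k : Int) + 1) "")) = true := by
  set_option maxRecDepth 4000 in decide

lemma pvEncodersAgree (k : Nat) (hk : k < 676) :
    pvNum2alpha (k + 1) ((k : Int) + 1) = pvAlphaLoop (k + 1) ((k : Int) + 1) "" := by
  have h := pvKey
  rw [List.all_eq_true] at h
  exact beq_iff_eq.mp (h k (List.mem_range.mpr hk))

-- ===== VERDICT (by name: the statement is the Claim_ definition above) =====
theorem create_masked_name_spec : Claim_equal_create_masked_name := by
  intro name _
  unfold Spec_create_masked_name create_masked_name create_masked_name_alt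
  set H := pvHashStr name.toList with hH
  have h0 : (0 : Int) ≤ PySem.Int.mod H 676 := PySem.Int.mod_nonneg H (by norm_num)
  have h1 : PySem.Int.mod H 676 < 676 := PySem.Int.mod_lt H (by norm_num)
  set k := (PySem.Int.mod H 676).toNat with hk
  have hkeq : PySem.Int.mod H 676 = (k : Int) := by omega
  have hklt : k < 676 := by omega
  have htn : (PySem.Int.mod H 676 + 1).toNat = k + 1 := by omega
  simp only [hkeq]
  have h2 : ((k : Int) + 1).toNat = k + 1 := by omega
  rw [h2]
  exact pvEncodersAgree k hklt
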